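-- pv_equiv track=rewrite | github.com/sai-vishnu-arvind/oac-slack-bot | src/oac_slack_bot/slack/events.py | strip_mentions
-- ===== SOURCE A (Python) =====
-- def strip_mentions(text: str) -> str:
--     """Remove <@BOT_ID> mention tokens from text."""
--     result: list[str] = []
--     chars = list(text)
--     i = 0
--
--     while i < len(chars):
--         if chars[i] == "<" and i + 1 < len(chars) and chars[i + 1] == "@":
--             # Consume until >
--             while i < len(chars) and chars[i] != ">":
--                 i += 1
--             i += 1  # skip >
--             # Skip one trailing space
--             if i < len(chars) and chars[i] == " ":
--                 i += 1
--         else: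
--             result.append(chars[i])
--             i += 1
--
--     return "".join(result)
-- ===== SOURCE B (Python) =====
-- def strip_mentions(text: str) -> str:
--     """Remove <@BOT_ID> mention tokens from text (find/slice segment jumper)."""
--     out = []
--     while True:
--         k = text.find("<@")
--         if k == -1:
--             out.append(text)
--             break
--         out.append(text[:k])
--         e = text.find(">", k)
--         if e == -1:
--             break
--         text = text[e + 1:]
--         if text.startswith(" "):
--             text = text[1:]
--     return "".join(out)
-- ===== Notes on version B (the rewrite author's own statement) =====
-- stated objective: alternative
-- what changed: A scans the string character by character with an index and an inner consume-until-'>' loop; B repeatedly jumps with str.find to the next '<@' and its closing '>' and copies the untouched segments whole by slicing.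
import Mathlib
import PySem

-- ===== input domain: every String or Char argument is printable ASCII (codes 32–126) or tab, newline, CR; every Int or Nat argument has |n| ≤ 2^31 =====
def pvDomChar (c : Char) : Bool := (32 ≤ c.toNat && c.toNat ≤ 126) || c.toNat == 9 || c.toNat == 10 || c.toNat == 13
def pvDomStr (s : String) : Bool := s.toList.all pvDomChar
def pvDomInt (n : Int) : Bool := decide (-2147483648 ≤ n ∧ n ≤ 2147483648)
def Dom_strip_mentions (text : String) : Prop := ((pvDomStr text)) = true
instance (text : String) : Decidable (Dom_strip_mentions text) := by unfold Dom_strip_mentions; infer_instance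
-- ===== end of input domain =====

-- B replaces A's character-by-character index scanner with a find/slice segment jumper:
-- it locates "<@" and ">" with str.find and copies untouched segments whole by slicing.

-- ===== PORT A =====
-- inner loop: `while i < len(chars) and chars[i] != ">": i += 1`
def stripMentionsSkipGt (chars : List Char) (i : Nat) : Nat :=
  if h : i < chars.length then
    if chars[i] ≠ '>' then stripMentionsSkipGt chars (i + 1) else i
  else i
termination_by chars.length - i

theorem stripMentionsSkipGt_ge (chars : List Char) (i : Nat) :
    i ≤ stripMentionsSkipGt chars i := by
  unfold stripMentionsSkipGt
  split
  · split
    · exact le_trans (Nat.le_succ i) (stripMentionsSkipGt_ge chars (i + 1))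
    · exact le_refl i
  · exact le_refl i
termination_by chars.length - i

-- outer `while i < len(chars)` loop of A
def stripMentionsLoopA (chars : List Char) (i : Nat) (result : List Char) : List Char :=
  if h : i < chars.length then
    if chars[i] = '<' ∧ i + 1 < chars.length ∧ chars[i + 1]? = some '@' then
      let j := stripMentionsSkipGt chars i + 1   -- consume until '>', then skip '>'
      -- skip one trailing space
      let i' := if h3 : j < chars.length then (if chars[j]'h3 = ' ' then j + 1 else j) else j
      stripMentionsLoopA chars i' result
    else
      stripMentionsLoopA chars (i + 1) (result ++ [chars[i]])
  else result
termination_by chars.length - i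
decreasing_by
  all_goals first
    | omega
    | (have hge := stripMentionsSkipGt_ge chars i
       split
       · split <;> omega
       · omega)

def strip_mentions (text : String) : String :=
  String.ofList (stripMentionsLoopA text.toList 0 [])

-- ===== PORT B =====
-- termination fact for B's loop (the remaining text strictly shrinks on each pass)
theorem stripMentionsLoopB_dec (text : List Char)
    (hk : PySem.Chars.find text ['<', '@'] ≠ -1)
    (he : PySem.Chars.findFrom text ['>'] (PySem.Chars.find text ['<', '@']) none ≠ -1) :
    (if PySem.Chars.startswith (PySem.List.slice text
          (some (PySem.Chars.findFrom text ['>'] (PySem.Chars.find text ['<', '@']) none + 1)) none) [' ']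
       then PySem.List.slice (PySem.List.slice text
          (some (PySem.Chars.findFrom text ['>'] (PySem.Chars.find text ['<', '@']) none + 1)) none) (some 1) none
       else PySem.List.slice text
          (some (PySem.Chars.findFrom text ['>'] (PySem.Chars.find text ['<', '@']) none + 1)) none).length
      < text.length := by
  have hinf : ['<', '@'] <:+: text := (PySem.Chars.find_ne_neg_one_iff _ _).1 hk
  have hk0 : 0 ≤ PySem.Chars.find text ['<', '@'] := (PySem.Chars.find_nonneg_iff _ _).2 hinf
  have hkl : PySem.Chars.find text ['<', '@'] ≤ (text.length : Int) :=
    PySem.Chars.find_le_length _ _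
  have hlen : 2 ≤ text.length := by
    have := hinf.length_le; simpa using this
  set k := PySem.Chars.find text ['<', '@'] with hkdef
  have hkn : k = ((k.toNat : Nat) : Int) := (Int.toNat_of_nonneg hk0).symm
  rw [hkn] at he ⊢
  rw [PySem.Chars.findFrom_natCast text ['>'] k.toNat (by omega)] at he ⊢
  set f := PySem.Chars.find (text.drop k.toNat) ['>'] with hfdef
  by_cases hf : f = -1
  · simp [hf] at he
  · have hf0 : 0 ≤ f := (PySem.Chars.find_nonneg_iff _ _).2 ((PySem.Chars.find_ne_neg_one_iff _ _).1 hf)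
    rw [if_neg hf]
    have h1 : (0:Int) ≤ (k.toNat : Int) + f + 1 := by omega
    rw [PySem.List.slice_from text h1]
    have hpos : 1 ≤ (((k.toNat : Int) + f + 1).toNat) := by omega
    have hd : (text.drop ((((k.toNat : Int) + f + 1)).toNat)).length < text.length := by
      rw [List.length_drop]; omega
    split
    · rw [PySem.List.slice_from _ (by norm_num : (0:Int) ≤ 1)]
      rw [List.length_drop]; omega
    · exact hd

-- B's `while True` loop; `out` accumulates the kept segments, joined ("" .join) at the end
def stripMentionsLoopB (text : List Char) (out : List (List Char)) : List Char :=
  let k := PySem.Chars.find text ['<', '@']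
  if k = -1 then (out ++ [text]).flatten
  else
    let out' := out ++ [PySem.List.slice text none (some k)]
    let e := PySem.Chars.findFrom text ['>'] k none
    if e = -1 then out'.flatten
    else
      let t1 := PySem.List.slice text (some (e + 1)) none
      let t2 := if PySem.Chars.startswith t1 [' '] then PySem.List.slice t1 (some 1) none else t1
      stripMentionsLoopB t2 out'
termination_by text.length
decreasing_by
  have := stripMentionsLoopB_dec text (by assumption) (by assumption)
  simpa [t2, t1, e, k] using this

def strip_mentions_alt (text : String) : String :=
  String.ofList (stripMentionsLoopB text.toList [])

-- ===== PRECONDITION & SPEC =====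
def Spec_strip_mentions (text : String) (out : String) : Prop := out = strip_mentions_alt text
instance (text : String) (out : String) : Decidable (Spec_strip_mentions text out) := by unfold Spec_strip_mentions; infer_instance

-- ===== CLAIM (what is proved, stated in full; the proofs are below) =====
def Claim_equal_strip_mentions : Prop := ∀ (text : String), Dom_strip_mentions text → Spec_strip_mentions text (strip_mentions text)

-- ===== LEMMAS AND PROOFS =====

-- proof-side reference function: a structural recursion both loops are shown equal to
def dropGt : List Char → List Char
  | [] => []
  | c :: r => if c = '>' then r else dropGt r

def dropSp : List Char → List Char
  | [] => []
  | c :: r => if c = ' ' then r else c :: r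

theorem dropGt_cons_length_le (c : Char) (r : List Char) :
    (dropGt (c :: r)).length ≤ r.length := by
  induction r generalizing c with
  | nil => simp [dropGt]
  | cons d rs ih =>
    simp only [dropGt]
    split
    · simp
    · exact le_trans (ih d) (by simp)

theorem dropSp_length_le (l : List Char) : (dropSp l).length ≤ l.length := by
  cases l with
  | nil => simp [dropSp]
  | cons c r => simp only [dropSp]; split <;> simp

def gSpec : List Char → List Char
  | [] => []
  | c :: cs =>
    if c = '<' ∧ cs.head? = some '@' then gSpec (dropSp (dropGt (c :: cs)))
    else c :: gSpec cs
termination_by l => l.length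
decreasing_by
  · calc (dropSp (dropGt (c :: cs))).length
        ≤ (dropGt (c :: cs)).length := dropSp_length_le _
      _ ≤ cs.length := dropGt_cons_length_le _ _
      _ < (c :: cs).length := by simp
  · simp

theorem gSpec_cons (c : Char) (cs : List Char) :
    gSpec (c :: cs) =
      if c = '<' ∧ cs.head? = some '@' then gSpec (dropSp (dropGt (c :: cs)))
      else c :: gSpec cs := by
  rw [gSpec]

theorem singleton_prefix_head (c : Char) (m : List Char) :
    [c] <+: m ↔ m.head? = some c := by
  cases m <;> simp [List.cons_prefix_iff]

theorem pair_prefix_iff (m : List Char) :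
    ['<', '@'] <+: m ↔ ∃ r, m = '<' :: '@' :: r := by
  constructor
  · intro h
    rw [List.cons_prefix_iff] at h
    obtain ⟨l', rfl, h2⟩ := h
    rw [List.cons_prefix_iff] at h2
    obtain ⟨l'', rfl, _⟩ := h2
    exact ⟨l'', rfl⟩
  · rintro ⟨r, rfl⟩
    exact ⟨r, rfl⟩

theorem dropGt_eq_nil (l : List Char) (h : '>' ∉ l) : dropGt l = [] := by
  induction l with
  | nil => rfl
  | cons c r ih =>
    simp only [dropGt]
    rw [if_neg (by intro hc; exact h (hc ▸ List.mem_cons_self ..))]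
    exact ih (fun hm => h (List.mem_cons_of_mem _ hm))

theorem dropGt_eq_drop (f : Nat) (l : List Char)
    (hf : l[f]? = some '>') (hmin : ∀ i < f, l[i]? ≠ some '>') :
    dropGt l = l.drop (f + 1) := by
  induction f generalizing l with
  | zero =>
    cases l with
    | nil => simp at hf
    | cons c r =>
      simp at hf
      simp [dropGt, hf]
  | succ f ih =>
    cases l with
    | nil => simp at hf
    | cons c r =>
      have hc : c ≠ '>' := by
        have := hmin 0 (Nat.succ_pos f); simpa using this
      simp only [dropGt, if_neg hc]
      have := ih r (by simpa using hf) (fun i hi => by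
        have := hmin (i + 1) (by omega); simpa using this)
      simpa using this

-- A's outer loop computes gSpec of the rest of the string
theorem drop_skipGt (chars : List Char) (i : Nat) :
    chars.drop (stripMentionsSkipGt chars i + 1) = dropGt (chars.drop i) := by
  unfold stripMentionsSkipGt
  split
  · rename_i h
    rw [List.drop_eq_getElem_cons h]
    split
    · rename_i hc
      rw [drop_skipGt chars (i + 1)]
      simp [dropGt, hc]
    · rename_i hc
      simp only [not_not] at hc
      simp [dropGt, hc]
  · rename_i h
    rw [List.drop_eq_nil_of_le (by omega), List.drop_eq_nil_of_le (by omega)]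
    rfl
termination_by chars.length - i

theorem loopA_eq (chars : List Char) (i : Nat) (acc : List Char) :
    stripMentionsLoopA chars i acc = acc ++ gSpec (chars.drop i) := by
  unfold stripMentionsLoopA
  split
  · rename_i h
    split
    · rename_i hcond
      obtain ⟨h1, h2, h3⟩ := hcond
      have hg : gSpec (chars.drop i) = gSpec (dropSp (dropGt (chars.drop i))) := by
        conv_lhs => rw [List.drop_eq_getElem_cons h, gSpec_cons]
        rw [if_pos ⟨h1, by rw [List.head?_drop]; exact h3⟩]
        rw [← List.drop_eq_getElem_cons h]
      -- the index after the optional space skip corresponds to dropSp ∘ dropGt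
      have hstep :
          chars.drop (if h3 : stripMentionsSkipGt chars i + 1 < chars.length then
              (if chars[stripMentionsSkipGt chars i + 1]'h3 = ' ' then stripMentionsSkipGt chars i + 2
               else stripMentionsSkipGt chars i + 1)
            else stripMentionsSkipGt chars i + 1)
            = dropSp (dropGt (chars.drop i)) := by
        rw [← drop_skipGt chars i]
        set j := stripMentionsSkipGt chars i + 1 with hj
        split
        · rename_i hjl
          rw [List.drop_eq_getElem_cons hjl]
          split
          · rename_i hsp
            simp [dropSp, hsp]
            omega
          · rename_i hsp
            rw [List.drop_eq_getElem_cons hjl]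
            simp [dropSp, hsp]
        · rename_i hjl
          rw [List.drop_eq_nil_of_le (by omega)]
          rfl
      rw [loopA_eq chars _ acc]
      rw [hg, ← hstep]
    · rename_i hcond
      rw [loopA_eq chars (i + 1) (acc ++ [chars[i]])]
      conv_rhs => rw [List.drop_eq_getElem_cons h, gSpec_cons]
      rw [if_neg (by
        intro ⟨e1, e2⟩
        rw [List.head?_drop] at e2
        exact hcond ⟨e1, by
          have := List.getElem?_eq_some_iff.1 e2
          exact ⟨this.1, e2⟩⟩)]
      simp
  · rename_i h
    rw [List.drop_eq_nil_of_le (by omega)]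
    simp [gSpec]
termination_by chars.length - i
decreasing_by
  all_goals first
    | omega
    | (have hge := stripMentionsSkipGt_ge chars i
       split
       · split <;> omega
       · omega)

-- if no "<@" starts in the first k positions, gSpec copies them verbatim
theorem gSpec_copy (k : Nat) (text : List Char)
    (hno : ∀ j < k, ¬ (['<', '@'] <+: text.drop j)) :
    gSpec text = text.take k ++ gSpec (text.drop k) := by
  induction k generalizing text with
  | zero => simp
  | succ k ih =>
    cases text with
    | nil => simp
    | cons c cs =>
      have h0 : ¬ (['<', '@'] <+: (c :: cs)) := by simpa using hno 0 (Nat.succ_pos k)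
      have hcond : ¬ (c = '<' ∧ cs.head? = some '@') := by
        rintro ⟨rfl, h2⟩
        apply h0
        rw [pair_prefix_iff]
        cases cs with
        | nil => simp at h2
        | cons d ds => simp at h2; exact ⟨ds, by rw [h2]⟩
      rw [gSpec_cons, if_neg hcond]
      rw [ih cs (fun j hj => by simpa using hno (j + 1) (by omega))]
      simp

theorem loopB_unfold (text : List Char) (out : List (List Char)) :
    stripMentionsLoopB text out =
      if PySem.Chars.find text ['<', '@'] = -1 then (out ++ [text]).flatten
      else if PySem.Chars.findFrom text ['>'] (PySem.Chars.find text ['<', '@']) none = -1 then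
        (out ++ [PySem.List.slice text none (some (PySem.Chars.find text ['<', '@']))]).flatten
      else
        stripMentionsLoopB
          (if PySem.Chars.startswith (PySem.List.slice text
                (some (PySem.Chars.findFrom text ['>'] (PySem.Chars.find text ['<', '@']) none + 1)) none) [' ']
           then PySem.List.slice (PySem.List.slice text
                (some (PySem.Chars.findFrom text ['>'] (PySem.Chars.find text ['<', '@']) none + 1)) none) (some 1) none
           else PySem.List.slice text
                (some (PySem.Chars.findFrom text ['>'] (PySem.Chars.find text ['<', '@']) none + 1)) none)
          (out ++ [PySem.List.slice text none (some (PySem.Chars.find text ['<', '@']))]) := by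
  rw [stripMentionsLoopB]

theorem loopB_eq_aux (n : Nat) (text : List Char) (hn : text.length ≤ n)
    (out : List (List Char)) :
    stripMentionsLoopB text out = out.flatten ++ gSpec text := by
  induction n generalizing text out with
  | zero =>
    have htext : text = [] := List.eq_nil_of_length_eq_zero (Nat.le_antisymm hn (Nat.zero_le _))
    subst htext
    rw [loopB_unfold, if_pos (by decide)]
    simp [gSpec]
  | succ n ih =>
    rw [loopB_unfold]
    split
    · rename_i hk
      have hni : ¬ (['<', '@'] <:+: text) := by
        rw [← PySem.Chars.find_ne_neg_one_iff]; simpa using hk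
      have hno : ∀ j, ¬ (['<', '@'] <+: text.drop j) := by
        intro j hj
        exact hni ((PySem.Chars.isIn_iff_infix _ _).1
          ((PySem.Chars.exists_prefix_drop_iff_isIn _ _).1 ⟨j, hj⟩))
      have : gSpec text = text := by
        rw [gSpec_copy text.length text (fun j _ => hno j)]
        simp [gSpec]
      rw [this]; simp
    · rename_i hk
      have hinf : ['<', '@'] <:+: text := (PySem.Chars.find_ne_neg_one_iff _ _).1 hk
      have hk0 : 0 ≤ PySem.Chars.find text ['<', '@'] := (PySem.Chars.find_nonneg_iff _ _).2 hinf
      have hlen2 : 2 ≤ text.length := by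
        have := hinf.length_le; simpa using this
      set k := PySem.Chars.find text ['<', '@'] with hkdef
      have hkn : k = ((k.toNat : Nat) : Int) := (Int.toNat_of_nonneg hk0).symm
      have hkl : k.toNat ≤ text.length := by
        have := PySem.Chars.find_le_length text ['<', '@']
        omega
      obtain ⟨hpre, hmin⟩ := PySem.Chars.find_spec (s := text) (sub := ['<', '@']) hk0
      have hcopy : gSpec text = text.take k.toNat ++ gSpec (text.drop k.toNat) :=
        gSpec_copy k.toNat text (fun j hj => hmin j hj)
      obtain ⟨r, hdk⟩ := (pair_prefix_iff _).1 hpre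
      have htake : PySem.List.slice text none (some k) = text.take k.toNat :=
        PySem.List.slice_to text hk0
      rw [hkn, PySem.Chars.findFrom_natCast text ['>'] k.toNat hkl]
      set f := PySem.Chars.find (text.drop k.toNat) ['>'] with hfdef
      have hgdk : gSpec (text.drop k.toNat) = gSpec (dropSp (dropGt (text.drop k.toNat))) := by
        conv_lhs => rw [hdk, gSpec_cons]
        rw [if_pos ⟨rfl, rfl⟩, ← hdk]
      by_cases hf : f = -1
      · rw [if_pos (by simp [hf])]
        have hnm : '>' ∉ text.drop k.toNat := by
          rw [← List.singleton_infix_iff]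
          exact fun hx => ((PySem.Chars.find_ne_neg_one_iff _ _).2 hx) hf
        have : gSpec (text.drop k.toNat) = [] := by
          rw [hgdk, dropGt_eq_nil _ hnm]; simp [dropSp, gSpec]
        rw [hcopy, this, ← hkn, htake]
        simp
      · rw [if_neg hf]
        have hf0 : 0 ≤ f := (PySem.Chars.find_nonneg_iff _ _).2 ((PySem.Chars.find_ne_neg_one_iff _ _).1 hf)
        rw [if_neg (show ¬((k.toNat : Int) + f = -1) by omega)]
        obtain ⟨hfpre, hfmin⟩ := PySem.Chars.find_spec (s := text.drop k.toNat) (sub := ['>']) hf0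
        have hef : ((k.toNat : Int) + f + 1).toNat = k.toNat + f.toNat + 1 := by omega
        have hgt : dropGt (text.drop k.toNat) = text.drop (k.toNat + f.toNat + 1) := by
          rw [dropGt_eq_drop f.toNat (text.drop k.toNat)
            (by rw [← List.head?_drop]; exact ((singleton_prefix_head _ _).1 hfpre))
            (fun i hi => by
              intro hx
              exact hfmin i hi ((singleton_prefix_head _ _).2
                (by rw [List.head?_drop]; exact hx)))]
          rw [List.drop_drop, show k.toNat + (f.toNat + 1) = k.toNat + f.toNat + 1 by omega]
        have ht1 : PySem.List.slice text (some ((k.toNat : Int) + f + 1)) none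
            = text.drop (k.toNat + f.toNat + 1) := by
          rw [PySem.List.slice_from text (by omega), hef]
        have ht2 :
            (if PySem.Chars.startswith (PySem.List.slice text (some ((k.toNat : Int) + f + 1)) none) [' ']
             then PySem.List.slice (PySem.List.slice text (some ((k.toNat : Int) + f + 1)) none) (some 1) none
             else PySem.List.slice text (some ((k.toNat : Int) + f + 1)) none)
            = dropSp (dropGt (text.drop k.toNat)) := by
          rw [ht1, hgt]
          set m := text.drop (k.toNat + f.toNat + 1) with hm
          cases hmc : m with
          | nil => rw [if_neg (by decide)]; rfl
          | cons d ds =>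
            by_cases hd : d = ' '
            · rw [if_pos (by simp [PySem.Chars.startswith, hd])]
              rw [PySem.List.slice_from _ (by norm_num : (0:Int) ≤ 1)]
              simp [dropSp, hd]
            · rw [if_neg (by simp [PySem.Chars.startswith]; exact fun hh => hd hh.symm)]
              simp [dropSp, hd]
        rw [ht2, hgt]
        have hlt : (dropSp (text.drop (k.toNat + f.toNat + 1))).length ≤ n := by
          have h1 := dropSp_length_le (text.drop (k.toNat + f.toNat + 1))
          rw [List.length_drop] at h1
          omega
        rw [ih _ hlt]
        rw [hcopy, hgdk, hgt, ← hkn, htake]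
        simp

theorem loopB_eq (text : List Char) (out : List (List Char)) :
    stripMentionsLoopB text out = out.flatten ++ gSpec text :=
  loopB_eq_aux text.length text le_rfl out

-- ===== VERDICT (by name: the statement is the Claim_ definition above) =====
theorem strip_mentions_spec : Claim_equal_strip_mentions := by
  intro text _
  unfold Spec_strip_mentions strip_mentions strip_mentions_alt
  rw [loopA_eq, loopB_eq]
  simp
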